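-- pv_equiv track=rewrite | github.com/generalaimodels/DSA | test/test2.py | max_heap_operations
-- ===== SOURCE A (Python) =====
-- from typing import Dict, List, Union, Optional, Tuple, Set, Deque
-- from heapq import heappush, heappop, heapify
--
-- def max_heap_operations(operations: List[Tuple[str, int]]) -> List[int]:
--     heap = []
--     results = []
--
--     for op, val in operations:
--         if op == "insert":
--             heappush(heap, -val)
--         elif op == "extract_max":
--             if heap:
--                 results.append(-heappop(heap))
--             else:
--                 results.append(-1)
--         elif op == "peek_max":
--             if heap:
--                 results.append(-heap[0])
--             else:
--                 results.append(-1)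
--
--     return results
-- ===== SOURCE B (Python) =====
-- from bisect import insort
-- from typing import List, Tuple
--
-- def max_heap_operations(operations: List[Tuple[str, int]]) -> List[int]:
--     data = []  # kept sorted ascending
--     results = []
--     for op, val in operations:
--         if op == "insert":
--             insort(data, val)
--         elif op == "extract_max":
--             results.append(data.pop() if data else -1)
--         elif op == "peek_max":
--             results.append(data[-1] if data else -1)
--     return results
-- ===== Notes on version B (the rewrite author's own statement) =====
-- stated objective: simpler
-- what changed: Replaces the negated min-heap (heappush/heappop with sift operations) by a plain ascending sorted list maintained with bisect.insort; the max is read/popped from the tail, removing all heap machinery.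
import Mathlib
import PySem

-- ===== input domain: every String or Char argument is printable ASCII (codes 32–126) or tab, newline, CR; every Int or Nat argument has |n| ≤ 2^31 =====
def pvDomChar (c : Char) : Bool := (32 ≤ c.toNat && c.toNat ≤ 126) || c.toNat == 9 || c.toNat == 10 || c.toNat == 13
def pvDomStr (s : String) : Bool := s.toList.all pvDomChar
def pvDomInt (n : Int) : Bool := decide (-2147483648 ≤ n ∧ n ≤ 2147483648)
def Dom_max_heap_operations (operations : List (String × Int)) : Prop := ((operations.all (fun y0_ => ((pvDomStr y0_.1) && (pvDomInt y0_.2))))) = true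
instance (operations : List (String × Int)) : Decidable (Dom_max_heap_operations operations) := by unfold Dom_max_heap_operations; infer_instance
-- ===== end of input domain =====

-- B replaces A's negated min-heap (heapq's sift machinery) by a plain ascending sorted
-- list (bisect.insort; max at the tail): simpler code, identical result sequence.

-- ===== PORT A =====
-- CPython heapq._siftdown(heap, startpos, pos), with newitem = heap[pos] passed explicitly
def pySiftdown (heap : List Int) (startpos : Nat) (newitem : Int) (pos : Nat) : List Int :=
  if _h : startpos < pos then
    if newitem < heap.getD ((pos - 1) / 2) 0 then
      pySiftdown (heap.set pos (heap.getD ((pos - 1) / 2) 0)) startpos newitem ((pos - 1) / 2)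
    else
      heap.set pos newitem
  else
    heap.set pos newitem
termination_by pos
decreasing_by omega

-- the child CPython's _siftup loop selects (right child iff it exists and left is not smaller)
def childSel (heap : List Int) (pos : Nat) : Nat :=
  if 2 * pos + 2 < heap.length ∧ ¬ (heap.getD (2 * pos + 1) 0 < heap.getD (2 * pos + 2) 0)
  then 2 * pos + 2 else 2 * pos + 1

lemma childSel_gt (heap : List Int) (pos : Nat) : pos < childSel heap pos := by
  unfold childSel; split <;> omega

lemma childSel_lt_len (heap : List Int) (pos : Nat) (h : 2 * pos + 1 < heap.length) :
    childSel heap pos < heap.length := by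
  unfold childSel; split <;> omega

-- CPython heapq._siftup(heap, pos), with newitem = heap[pos] passed explicitly
def pySiftup (heap : List Int) (startpos : Nat) (newitem : Int) (pos : Nat) : List Int :=
  if _h : 2 * pos + 1 < heap.length then
    pySiftup (heap.set pos (heap.getD (childSel heap pos) 0)) startpos newitem (childSel heap pos)
  else
    pySiftdown (heap.set pos newitem) startpos newitem pos
termination_by heap.length - pos
decreasing_by
  simp only [List.length_set]
  have := childSel_gt heap pos
  have := childSel_lt_len heap pos _h
  omega

-- heapq.heappush: append, then sift the new leaf towards the root
def pyHeappush (heap : List Int) (item : Int) : List Int :=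
  pySiftdown (heap ++ [item]) 0 item heap.length

-- heapq.heappop (A only calls it on a non-empty heap)
def pyHeappop (heap : List Int) : Int × List Int :=
  let lastelt := heap.getD (heap.length - 1) 0
  let rest := heap.dropLast
  if rest.isEmpty then (lastelt, rest)
  else (rest.getD 0 0, pySiftup (rest.set 0 lastelt) 0 lastelt 0)

def maxHeapLoopA : List (String × Int) → List Int → List Int → List Int
  | [], _, results => results
  | (op, val) :: rest, heap, results =>
    if op = "insert" then
      maxHeapLoopA rest (pyHeappush heap (-val)) results
    else if op = "extract_max" then
      if heap.isEmpty then maxHeapLoopA rest heap (results ++ [-1])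
      else
        let r := pyHeappop heap
        maxHeapLoopA rest r.2 (results ++ [-r.1])
    else if op = "peek_max" then
      if heap.isEmpty then maxHeapLoopA rest heap (results ++ [-1])
      else maxHeapLoopA rest heap (results ++ [-(heap.getD 0 0)])
    else
      maxHeapLoopA rest heap results

def max_heap_operations (operations : List (String × Int)) : List Int :=
  maxHeapLoopA operations [] []

-- ===== PORT B =====
-- bisect.insort into an ascending list (inserts after equal elements)
def insortB (x : Int) : List Int → List Int
  | [] => [x]
  | y :: ys => if x < y then x :: y :: ys else y :: insortB x ys

def maxHeapLoopB : List (String × Int) → List Int → List Int → List Int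
  | [], _, results => results
  | (op, val) :: rest, data, results =>
    if op = "insert" then
      maxHeapLoopB rest (insortB val data) results
    else if op = "extract_max" then
      if data.isEmpty then maxHeapLoopB rest data (results ++ [-1])
      else maxHeapLoopB rest data.dropLast (results ++ [data.getD (data.length - 1) 0])
    else if op = "peek_max" then
      if data.isEmpty then maxHeapLoopB rest data (results ++ [-1])
      else maxHeapLoopB rest data (results ++ [data.getD (data.length - 1) 0])
    else
      maxHeapLoopB rest data results

def max_heap_operations_alt (operations : List (String × Int)) : List Int :=
  maxHeapLoopB operations [] []

-- ===== PRECONDITION & SPEC =====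
def Spec_max_heap_operations (operations : List (String × Int)) (out : List Int) : Prop := out = max_heap_operations_alt operations
instance (operations : List (String × Int)) (out : List Int) : Decidable (Spec_max_heap_operations operations out) := by unfold Spec_max_heap_operations; infer_instance

-- ===== CLAIM (what is proved, stated in full; the proofs are below) =====
def Claim_equal_max_heap_operations : Prop := ∀ (operations : List (String × Int)), Dom_max_heap_operations operations → Spec_max_heap_operations operations (max_heap_operations operations)

-- ===== LEMMAS AND PROOFS =====

-- the min-heap invariant: every non-root element is ≥ its parent
def IsHeap (h : List Int) : Prop :=
  ∀ j, 0 < j → j < h.length → h.getD ((j - 1) / 2) 0 ≤ h.getD j 0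

-- "heap with a hole at pos": all parent links not touching pos hold
def HoleP1 (h : List Int) (pos : Nat) : Prop :=
  ∀ j, 0 < j → j < h.length → j ≠ pos → (j - 1) / 2 ≠ pos →
    h.getD ((j - 1) / 2) 0 ≤ h.getD j 0

-- children of the hole dominate the pending item x
def HoleP2 (h : List Int) (pos : Nat) (x : Int) : Prop :=
  ∀ j, 0 < j → j < h.length → (j - 1) / 2 = pos → x ≤ h.getD j 0

-- children of the hole dominate the hole's parent value
def HoleP3 (h : List Int) (pos : Nat) : Prop :=
  ∀ j, 0 < j → j < h.length → (j - 1) / 2 = pos → 0 < pos →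
    h.getD ((pos - 1) / 2) 0 ≤ h.getD j 0

lemma getD_set_self (l : List Int) (i : Nat) (a : Int) (hi : i < l.length) :
    (l.set i a).getD i 0 = a := by
  simp [List.getD, hi]

lemma getD_set_ne (l : List Int) (i j : Nat) (a : Int) (hij : i ≠ j) :
    (l.set i a).getD j 0 = l.getD j 0 := by
  simp [List.getD, List.getElem?_set_ne hij]

lemma set_getD_self (l : List Int) (i : Nat) (hi : i < l.length) :
    l.set i (l.getD i 0) = l := by
  rw [List.getD_eq_getElem l 0 hi]; exact List.set_getElem_self ..

lemma getD_append_left (l l2 : List Int) (n : Nat) (h : n < l.length) :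
    (l ++ l2).getD n 0 = l.getD n 0 := by
  simp [List.getD, List.getElem?_append_left h]

lemma getD_dropLast (l : List Int) (n : Nat) (h : n < l.length - 1) :
    l.dropLast.getD n 0 = l.getD n 0 := by
  rw [List.getD_eq_getElem _ _ (by simpa using h), List.getD_eq_getElem _ _ (by omega)]
  apply List.getElem_dropLast

lemma getD_mem' (l : List Int) (n : Nat) (h : n < l.length) : l.getD n 0 ∈ l := by
  rw [List.getD_eq_getElem _ _ h]; exact List.getElem_mem h

lemma perm_cons_set : ∀ (l : List Int) (j : Nat) (a b : Int), j < l.length →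
    (a :: l.set j b).Perm (b :: l.set j a)
  | [], j, a, b, hj => by simp at hj
  | y :: l, 0, a, b, _ => by
      simpa using List.Perm.swap _ _ _
  | y :: l, j + 1, a, b, hj => by
      simp only [List.set_cons_succ]
      exact (List.Perm.swap _ _ _).trans
        (((perm_cons_set l j a b (by simpa using hj)).cons y).trans (List.Perm.swap _ _ _))

lemma perm_set_set_lt : ∀ (l : List Int) (i j : Nat) (a b : Int), i < j → j < l.length →
    ((l.set i a).set j b).Perm ((l.set i b).set j a)
  | [], _, _, _, _, _, hj => by simp at hj
  | y :: l, 0, j + 1, a, b, _, hj => by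
      simp only [List.set_cons_zero, List.set_cons_succ]
      exact perm_cons_set l j a b (by simpa using hj)
  | y :: l, i + 1, j + 1, a, b, hij, hj => by
      simp only [List.set_cons_succ]
      exact (perm_set_set_lt l i j a b (by omega) (by simpa using hj)).cons y

lemma perm_set_set (l : List Int) (i j : Nat) (a b : Int)
    (hi : i < l.length) (hj : j < l.length) (hij : i ≠ j) :
    ((l.set i a).set j b).Perm ((l.set i b).set j a) := by
  rcases Nat.lt_or_ge i j with h | h
  · exact perm_set_set_lt l i j a b h hj
  · have hji : j < i := by omega
    rw [List.set_comm _ _ hij, List.set_comm _ _ hij]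
    exact perm_set_set_lt l j i b a hji hi

lemma childSel_cases (heap : List Int) (pos : Nat) :
    childSel heap pos = 2 * pos + 1 ∨ childSel heap pos = 2 * pos + 2 := by
  unfold childSel; split
  · right; rfl
  · left; rfl

lemma childSel_min (heap : List Int) (pos : Nat) (_h : 2 * pos + 1 < heap.length) :
    ∀ d, d < heap.length → (d = 2 * pos + 1 ∨ d = 2 * pos + 2) →
      heap.getD (childSel heap pos) 0 ≤ heap.getD d 0 := by
  intro d hd hdor
  unfold childSel
  split
  · rename_i hcond
    rcases hdor with rfl | rfl
    · exact le_of_not_gt hcond.2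
    · exact le_refl _
  · rename_i hcond
    rcases hdor with rfl | rfl
    · exact le_refl _
    · have : heap.getD (2 * pos + 1) 0 < heap.getD (2 * pos + 2) 0 := by
        by_contra hlt
        exact hcond ⟨hd, hlt⟩
      exact le_of_lt this

lemma siftdown_correct : ∀ (pos : Nat) (heap : List Int) (x : Int),
    pos < heap.length → HoleP1 heap pos → HoleP2 heap pos x → HoleP3 heap pos →
    IsHeap (pySiftdown heap 0 x pos) ∧ (pySiftdown heap 0 x pos).Perm (heap.set pos x) := by
  intro pos
  induction pos using Nat.strong_induction_on with | _ pos ih =>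
  intro heap x hlen h1 h2 h3
  rw [pySiftdown]
  by_cases hp : 0 < pos
  · rw [dif_pos hp]
    by_cases hx : x < heap.getD ((pos - 1) / 2) 0
    · rw [if_pos hx]
      have hpplt : (pos - 1) / 2 < pos := by omega
      have hplen : (pos - 1) / 2 < (heap.set pos (heap.getD ((pos - 1) / 2) 0)).length := by
        simp only [List.length_set]; omega
      have hnewP1 : HoleP1 (heap.set pos (heap.getD ((pos - 1) / 2) 0)) ((pos - 1) / 2) := by
        intro j hj0 hjlen hjne hjpar
        simp only [List.length_set] at hjlen
        have hjnepos : j ≠ pos := by omega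
        by_cases hc : (j - 1) / 2 = pos
        · rw [hc, getD_set_self _ _ _ hlen, getD_set_ne _ _ _ _ (Ne.symm hjnepos)]
          exact h3 j hj0 hjlen hc hp
        · rw [getD_set_ne _ _ _ _ (fun h => hc h.symm), getD_set_ne _ _ _ _ (Ne.symm hjnepos)]
          exact h1 j hj0 hjlen hjnepos hc
      have hnewP2 : HoleP2 (heap.set pos (heap.getD ((pos - 1) / 2) 0)) ((pos - 1) / 2) x := by
        intro j hj0 hjlen hjpar
        simp only [List.length_set] at hjlen
        by_cases hc : j = pos
        · subst hc; rw [getD_set_self _ _ _ hlen]; exact le_of_lt hx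
        · rw [getD_set_ne _ _ _ _ (Ne.symm hc)]
          have hstep : heap.getD ((j - 1) / 2) 0 ≤ heap.getD j 0 :=
            h1 j hj0 hjlen hc (by omega)
          rw [hjpar] at hstep
          exact (le_of_lt hx).trans hstep
      have hnewP3 : HoleP3 (heap.set pos (heap.getD ((pos - 1) / 2) 0)) ((pos - 1) / 2) := by
        intro j hj0 hjlen hjpar hpp0
        simp only [List.length_set] at hjlen
        have hgp : ((pos - 1) / 2 - 1) / 2 ≠ pos := by omega
        rw [getD_set_ne _ _ _ _ (fun h => hgp h.symm)]
        have hppgood : heap.getD (((pos - 1) / 2 - 1) / 2) 0 ≤ heap.getD ((pos - 1) / 2) 0 :=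
          h1 ((pos - 1) / 2) hpp0 (by omega) (by omega) (by omega)
        by_cases hc : j = pos
        · subst hc; rw [getD_set_self _ _ _ hlen]; exact hppgood
        · rw [getD_set_ne _ _ _ _ (Ne.symm hc)]
          have hstep : heap.getD ((j - 1) / 2) 0 ≤ heap.getD j 0 :=
            h1 j hj0 hjlen hc (by omega)
          rw [hjpar] at hstep
          exact hppgood.trans hstep
      obtain ⟨hH, hP⟩ := ih ((pos - 1) / 2) hpplt (heap.set pos (heap.getD ((pos - 1) / 2) 0)) x hplen hnewP1 hnewP2 hnewP3
      refine ⟨hH, hP.trans ?_⟩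
      have hsw := perm_set_set heap pos ((pos - 1) / 2) (heap.getD ((pos - 1) / 2) 0) x hlen (by omega) (by omega)
      refine hsw.trans ?_
      have he : heap.getD ((pos - 1) / 2) 0 = (heap.set pos x).getD ((pos - 1) / 2) 0 :=
        (getD_set_ne heap pos ((pos - 1) / 2) x (by omega)).symm
      rw [he, set_getD_self _ _ (by simp only [List.length_set]; omega)]
    · rw [if_neg hx]
      refine ⟨?_, List.Perm.refl _⟩
      intro j hj0 hjlen
      simp only [List.length_set] at hjlen
      by_cases hc1 : j = pos
      · subst hc1
        rw [getD_set_ne _ _ _ _ (by omega : j ≠ (j - 1) / 2), getD_set_self _ _ _ hlen]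
        exact le_of_not_gt hx
      · by_cases hc2 : (j - 1) / 2 = pos
        · rw [hc2, getD_set_self _ _ _ hlen, getD_set_ne _ _ _ _ (Ne.symm hc1)]
          exact h2 j hj0 hjlen hc2
        · rw [getD_set_ne _ _ _ _ (fun h => hc2 h.symm), getD_set_ne _ _ _ _ (Ne.symm hc1)]
          exact h1 j hj0 hjlen hc1 hc2
  · rw [dif_neg hp]
    have hpos0 : pos = 0 := by omega
    subst hpos0
    refine ⟨?_, List.Perm.refl _⟩
    intro j hj0 hjlen
    simp only [List.length_set] at hjlen
    by_cases hc : (j - 1) / 2 = 0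
    · rw [hc, getD_set_self _ _ _ hlen, getD_set_ne _ _ _ _ (by omega : (0:Nat) ≠ j)]
      exact h2 j hj0 hjlen hc
    · rw [getD_set_ne _ _ _ _ (fun h => hc h.symm), getD_set_ne _ _ _ _ (by omega : (0:Nat) ≠ j)]
      exact h1 j hj0 hjlen (by omega) hc

lemma siftup_correct : ∀ (n pos : Nat) (heap : List Int) (x : Int),
    heap.length - pos = n →
    pos < heap.length → HoleP1 heap pos → HoleP3 heap pos →
    IsHeap (pySiftup heap 0 x pos) ∧ (pySiftup heap 0 x pos).Perm (heap.set pos x) := by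
  intro n
  induction n using Nat.strong_induction_on with | _ n ih =>
  intro pos heap x hn hlen h1 h3
  rw [pySiftup]
  by_cases hc : 2 * pos + 1 < heap.length
  · rw [dif_pos hc]
    have hcgt : pos < childSel heap pos := childSel_gt heap pos
    have hclt : childSel heap pos < heap.length := childSel_lt_len heap pos hc
    have hcch : childSel heap pos = 2 * pos + 1 ∨ childSel heap pos = 2 * pos + 2 :=
      childSel_cases heap pos
    have hcpar : (childSel heap pos - 1) / 2 = pos := by rcases hcch with h | h <;> omega
    have hnewP1 : HoleP1 (heap.set pos (heap.getD (childSel heap pos) 0)) (childSel heap pos) := by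
      intro j hj0 hjlen hjne hjpar
      simp only [List.length_set] at hjlen
      by_cases hjpos : j = pos
      · have hpos0 : 0 < pos := hjpos ▸ hj0
        rw [hjpos, getD_set_ne _ _ _ _ (by omega : pos ≠ (pos - 1) / 2), getD_set_self _ _ _ hlen]
        exact h3 (childSel heap pos) (by omega) hclt hcpar hpos0
      · by_cases hjch : (j - 1) / 2 = pos
        · rw [hjch, getD_set_self _ _ _ hlen, getD_set_ne _ _ _ _ (Ne.symm hjpos)]
          exact childSel_min heap pos hc j hjlen (by omega)
        · rw [getD_set_ne _ _ _ _ (fun h => hjch h.symm), getD_set_ne _ _ _ _ (Ne.symm hjpos)]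
          exact h1 j hj0 hjlen hjpos hjch
    have hnewP3 : HoleP3 (heap.set pos (heap.getD (childSel heap pos) 0)) (childSel heap pos) := by
      intro j hj0 hjlen hjch _hc0
      simp only [List.length_set] at hjlen
      have hjgtpos : pos < j := by omega
      rw [hcpar, getD_set_self _ _ _ hlen, getD_set_ne _ _ _ _ (by omega : pos ≠ j), ← hjch]
      exact h1 j hj0 hjlen (by omega) (by omega)
    obtain ⟨hH, hP⟩ := ih (heap.length - childSel heap pos) (by omega) (childSel heap pos)
      (heap.set pos (heap.getD (childSel heap pos) 0)) x
      (by simp only [List.length_set]) (by simp only [List.length_set]; omega) hnewP1 hnewP3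
    refine ⟨hH, hP.trans ?_⟩
    have hsw := perm_set_set heap pos (childSel heap pos) (heap.getD (childSel heap pos) 0) x
      hlen hclt (by omega)
    refine hsw.trans ?_
    have he : heap.getD (childSel heap pos) 0 = (heap.set pos x).getD (childSel heap pos) 0 :=
      (getD_set_ne heap pos (childSel heap pos) x (by omega)).symm
    rw [he, set_getD_self _ _ (by simp only [List.length_set]; omega)]
  · rw [dif_neg hc]
    have hbP1 : HoleP1 (heap.set pos x) pos := by
      intro j hj0 hjlen hjne hjpar
      simp only [List.length_set] at hjlen
      rw [getD_set_ne _ _ _ _ (fun h => hjpar h.symm), getD_set_ne _ _ _ _ (Ne.symm hjne)]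
      exact h1 j hj0 hjlen hjne hjpar
    have hbP2 : HoleP2 (heap.set pos x) pos x := by
      intro j hj0 hjlen hjch
      simp only [List.length_set] at hjlen
      omega
    have hbP3 : HoleP3 (heap.set pos x) pos := by
      intro j hj0 hjlen hjch _
      simp only [List.length_set] at hjlen
      omega
    obtain ⟨hH, hP⟩ := siftdown_correct pos (heap.set pos x) x
      (by simp only [List.length_set]; omega) hbP1 hbP2 hbP3
    refine ⟨hH, hP.trans ?_⟩
    rw [List.set_set]

lemma heappush_correct (heap : List Int) (x : Int) (hh : IsHeap heap) :
    IsHeap (pyHeappush heap x) ∧ (pyHeappush heap x).Perm (x :: heap) := by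
  unfold pyHeappush
  have hlen : heap.length < (heap ++ [x]).length := by simp
  have hP1 : HoleP1 (heap ++ [x]) heap.length := by
    intro j hj0 hjlen hjne hjpar
    simp only [List.length_append, List.length_cons, List.length_nil] at hjlen
    have hjlt : j < heap.length := by omega
    rw [getD_append_left _ _ _ hjlt, getD_append_left _ _ _ (by omega)]
    exact hh j hj0 hjlt
  have hP2 : HoleP2 (heap ++ [x]) heap.length x := by
    intro j hj0 hjlen hjch
    simp only [List.length_append, List.length_cons, List.length_nil] at hjlen
    omega
  have hP3 : HoleP3 (heap ++ [x]) heap.length := by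
    intro j hj0 hjlen hjch _
    simp only [List.length_append, List.length_cons, List.length_nil] at hjlen
    omega
  obtain ⟨hH, hP⟩ := siftdown_correct heap.length (heap ++ [x]) x hlen hP1 hP2 hP3
  refine ⟨hH, hP.trans ?_⟩
  have he : ((heap ++ [x]).getD heap.length 0) = x := by
    simp [List.getD]
  have hid : (heap ++ [x]).set heap.length x = heap ++ [x] := by
    have h0 := set_getD_self (heap ++ [x]) heap.length hlen
    rwa [he] at h0
  rw [hid]
  exact List.perm_append_singleton x heap

lemma heappop_correct (heap : List Int) (hh : IsHeap heap) (hne : heap ≠ []) :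
    (pyHeappop heap).1 = heap.getD 0 0 ∧ IsHeap (pyHeappop heap).2 ∧
      heap.Perm ((pyHeappop heap).1 :: (pyHeappop heap).2) := by
  obtain ⟨a, t, rfl⟩ := List.exists_cons_of_ne_nil hne
  cases t with
  | nil => refine ⟨by simp [pyHeappop], by intro j hj0 hjlen; simp [pyHeappop] at hjlen,
      by simp [pyHeappop]⟩
  | cons b t' =>
    have htne : (b :: t') ≠ [] := by simp
    have hdl : (a :: b :: t').dropLast = a :: (b :: t').dropLast :=
      List.dropLast_cons_of_ne_nil htne
    have hlast : (a :: b :: t').getD ((a :: b :: t').length - 1) 0 = (b :: t').getLast htne := by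
      rw [List.getLast_eq_getElem, List.getD_eq_getElem _ _ (by simp)]
      simp
    have hEmp : ¬ ((a :: b :: t').dropLast.isEmpty) := by
      rw [hdl]; simp
    have hstep : pyHeappop (a :: b :: t') =
        (((a :: b :: t').dropLast).getD 0 0,
          pySiftup (((a :: b :: t').dropLast).set 0 ((b :: t').getLast htne)) 0
            ((b :: t').getLast htne) 0) := by
      rw [pyHeappop]
      simp only [hEmp, if_neg, Bool.false_eq_true, not_false_eq_true, hlast]
    set L := (b :: t').getLast htne with hL
    have hset : ((a :: b :: t').dropLast).set 0 L = L :: (b :: t').dropLast := by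
      rw [hdl]; rfl
    have hlen0 : 0 < (((a :: b :: t').dropLast).set 0 L).length := by
      rw [hset]; simp
    have hpP1 : HoleP1 (((a :: b :: t').dropLast).set 0 L) 0 := by
      intro j hj0 hjlen hjne hjpar
      simp only [List.length_set] at hjlen
      have hget : ∀ k, 0 < k → k < ((a :: b :: t').dropLast).length →
          (((a :: b :: t').dropLast).set 0 L).getD k 0 = (a :: b :: t').getD k 0 := by
        intro k hk0 hklen
        rw [getD_set_ne _ _ _ _ (by omega), getD_dropLast _ _ (by simp at hklen ⊢; omega)]
      rw [hget j hj0 hjlen, hget ((j - 1) / 2) (by omega) (by omega)]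
      exact hh j hj0 (by simp at hjlen ⊢; omega)
    have hpP3 : HoleP3 (((a :: b :: t').dropLast).set 0 L) 0 := by
      intro j hj0 hjlen hjch hc0
      omega
    obtain ⟨hH, hP⟩ := siftup_correct ((((a :: b :: t').dropLast).set 0 L).length) 0
      (((a :: b :: t').dropLast).set 0 L) L rfl hlen0 hpP1 hpP3
    refine ⟨?_, ?_, ?_⟩
    · rw [hstep, hdl]; rfl
    · rw [hstep]; exact hH
    · rw [hstep]
      simp only
      have hgd0 : ((a :: b :: t').dropLast).getD 0 0 = a := by rw [hdl]; rfl
      rw [hgd0]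
      refine List.Perm.cons a ?_
      have hperm2 : (pySiftup (((a :: b :: t').dropLast).set 0 L) 0 L 0).Perm
          (((a :: b :: t').dropLast).set 0 L) := by
        have := hP
        rwa [List.set_set] at this
      refine (List.Perm.symm ?_).trans hperm2.symm
      rw [hset]
      have hsplit : (b :: t').dropLast ++ [L] = b :: t' := List.dropLast_append_getLast htne
      have hstep2 : ((b :: t').dropLast ++ [L]).Perm (b :: t') := by rw [hsplit]
      exact (List.perm_append_singleton L ((b :: t').dropLast)).symm.trans hstep2


lemma heap_root_le (heap : List Int) (hh : IsHeap heap) :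
    ∀ j, j < heap.length → heap.getD 0 0 ≤ heap.getD j 0 := by
  intro j
  induction j using Nat.strong_induction_on with | _ j ih =>
  intro hj
  rcases Nat.eq_zero_or_pos j with rfl | hj0
  · exact le_refl _
  · exact (ih ((j - 1) / 2) (by omega) (by omega)).trans (hh j hj0 hj)

lemma heap_root_le_mem (heap : List Int) (hh : IsHeap heap) :
    ∀ x ∈ heap, heap.getD 0 0 ≤ x := by
  intro x hx
  obtain ⟨i, hi, rfl⟩ := List.mem_iff_getElem.1 hx
  rw [← List.getD_eq_getElem heap 0 hi]
  exact heap_root_le heap hh i hi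

lemma insort_perm (x : Int) : ∀ (l : List Int), (insortB x l).Perm (x :: l)
  | [] => by simp [insortB]
  | y :: ys => by
      rw [insortB]
      split
      · exact List.Perm.refl _
      · exact ((insort_perm x ys).cons y).trans (List.Perm.swap _ _ _)

lemma insort_sorted (x : Int) : ∀ (l : List Int), l.Pairwise (· ≤ ·) →
    (insortB x l).Pairwise (· ≤ ·)
  | [], _ => by simp [insortB]
  | y :: ys, hs => by
      rw [List.pairwise_cons] at hs
      obtain ⟨hy, hys⟩ := hs
      rw [insortB]
      split
      · rename_i hxy
        refine List.pairwise_cons.2 ⟨?_, List.pairwise_cons.2 ⟨hy, hys⟩⟩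
        intro z hz
        rcases List.mem_cons.1 hz with rfl | hz'
        · exact le_of_lt hxy
        · exact (le_of_lt hxy).trans (hy z hz')
      · rename_i hxy
        refine List.pairwise_cons.2 ⟨?_, insort_sorted x ys hys⟩
        intro z hz
        have hz' := (insort_perm x ys).mem_iff.1 hz
        rcases List.mem_cons.1 hz' with rfl | hz''
        · exact le_of_not_gt hxy
        · exact hy z hz''

lemma sorted_le_last : ∀ (l : List Int), l.Pairwise (· ≤ ·) →
    ∀ v ∈ l, v ≤ l.getD (l.length - 1) 0
  | [], _, v, hv => by simp at hv
  | y :: ys, hs, v, hv => by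
      rw [List.pairwise_cons] at hs
      obtain ⟨hy, hys⟩ := hs
      cases ys with
      | nil => simp at hv ⊢; omega
      | cons z zs =>
        have hlen : (y :: z :: zs).length - 1 = (z :: zs).length - 1 + 1 := by simp
        rw [hlen, List.getD_cons_succ]
        rcases List.mem_cons.1 hv with rfl | hv'
        · exact hy _ (getD_mem' _ _ (by simp))
        · exact sorted_le_last (z :: zs) hys v hv'

-- the heap root is the negated maximum of the sorted list
lemma root_eq_neg_last (heap data : List Int) (hh : IsHeap heap)
    (hp : heap.Perm (data.map (fun v => -v))) (hs : data.Pairwise (· ≤ ·)) (hne : data ≠ []) :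
    heap.getD 0 0 = -(data.getD (data.length - 1) 0) := by
  have hlen : heap.length = data.length := by simpa using hp.length_eq
  have hd0 : 0 < data.length := List.length_pos_of_ne_nil hne
  have hlast_mem : data.getD (data.length - 1) 0 ∈ data := getD_mem' _ _ (by omega)
  have h1 : heap.getD 0 0 ≤ -(data.getD (data.length - 1) 0) :=
    heap_root_le_mem heap hh _ (hp.mem_iff.2 (List.mem_map_of_mem hlast_mem))
  have hroot_mem : heap.getD 0 0 ∈ heap := getD_mem' _ _ (by omega)
  obtain ⟨v, hv, hveq⟩ := List.mem_map.1 (hp.subset hroot_mem)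
  have h2 : v ≤ data.getD (data.length - 1) 0 := sorted_le_last data hs v hv
  omega

lemma loop_eq : ∀ (ops : List (String × Int)) (heap data res : List Int),
    IsHeap heap → heap.Perm (data.map (fun v => -v)) → data.Pairwise (· ≤ ·) →
    maxHeapLoopA ops heap res = maxHeapLoopB ops data res := by
  intro ops
  induction ops with
  | nil => intro heap data res _ _ _; rfl
  | cons hd rest ih =>
    obtain ⟨op, val⟩ := hd
    intro heap data res hH hP hS
    have hlen_eq : heap.length = data.length := by simpa using hP.length_eq
    rw [maxHeapLoopA, maxHeapLoopB]
    by_cases h1 : op = "insert"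
    · rw [if_pos h1, if_pos h1]
      obtain ⟨hH', hP'⟩ := heappush_correct heap (-val) hH
      refine ih _ _ _ hH' ?_ (insort_sorted val data hS)
      refine hP'.trans ?_
      refine (hP.cons (-val)).trans ?_
      exact (((insort_perm val data).map _).symm : _)
    · rw [if_neg h1, if_neg h1]
      by_cases h2 : op = "extract_max"
      · rw [if_pos h2, if_pos h2]
        by_cases hemp : heap.isEmpty
        · have hdemp : data.isEmpty := by
            rw [List.isEmpty_iff_length_eq_zero] at hemp ⊢; omega
          rw [if_pos hemp, if_pos hdemp]
          exact ih _ _ _ hH hP hS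
        · have hdemp : ¬ data.isEmpty := by
            rw [List.isEmpty_iff_length_eq_zero] at hemp ⊢; omega
          rw [if_neg hemp, if_neg hdemp]
          have hne : heap ≠ [] := by simpa [List.isEmpty_iff] using hemp
          have hdne : data ≠ [] := by simpa [List.isEmpty_iff] using hdemp
          obtain ⟨hr1, hH', hPerm⟩ := heappop_correct heap hH hne
          have hroot := root_eq_neg_last heap data hH hP hS hdne
          have hv : -(pyHeappop heap).1 = data.getD (data.length - 1) 0 := by
            rw [hr1, hroot]; ring
          show maxHeapLoopA rest (pyHeappop heap).2 (res ++ [-(pyHeappop heap).1]) =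
            maxHeapLoopB rest data.dropLast (res ++ [data.getD (data.length - 1) 0])
          rw [hv]
          refine ih _ _ _ hH' ?_ (List.Pairwise.sublist (List.dropLast_sublist data) hS)
          -- (pyHeappop heap).2 ~ map (-) data.dropLast
          have hsplit : data.dropLast ++ [data.getLast hdne] = data := List.dropLast_append_getLast hdne
          have hlastD : data.getLast hdne = data.getD (data.length - 1) 0 := by
            rw [List.getLast_eq_getElem, List.getD_eq_getElem _ _
              (by have := List.length_pos_of_ne_nil hdne; omega)]
          have hmapsplit : data.map (fun v => -v) =
              data.dropLast.map (fun v => -v) ++ [-(data.getD (data.length - 1) 0)] := by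
            conv_lhs => rw [← hsplit]
            rw [List.map_append, hlastD]; rfl
          have hchain : ((pyHeappop heap).1 :: (pyHeappop heap).2).Perm
              (-(data.getD (data.length - 1) 0) :: data.dropLast.map (fun v => -v)) := by
            refine hPerm.symm.trans (hP.trans ?_)
            rw [hmapsplit]
            exact List.perm_append_singleton _ _
          rw [hr1, hroot] at hchain
          exact hchain.cons_inv
      · rw [if_neg h2, if_neg h2]
        by_cases h3 : op = "peek_max"
        · rw [if_pos h3, if_pos h3]
          by_cases hemp : heap.isEmpty
          · have hdemp : data.isEmpty := by
              rw [List.isEmpty_iff_length_eq_zero] at hemp ⊢; omega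
            rw [if_pos hemp, if_pos hdemp]
            exact ih _ _ _ hH hP hS
          · have hdemp : ¬ data.isEmpty := by
              rw [List.isEmpty_iff_length_eq_zero] at hemp ⊢; omega
            rw [if_neg hemp, if_neg hdemp]
            have hdne : data ≠ [] := by simpa [List.isEmpty_iff] using hdemp
            have hroot := root_eq_neg_last heap data hH hP hS hdne
            rw [hroot]
            have : - -(data.getD (data.length - 1) 0) = data.getD (data.length - 1) 0 := by ring
            rw [this]
            exact ih _ _ _ hH hP hS
        · rw [if_neg h3, if_neg h3]
          exact ih _ _ _ hH hP hS

-- ===== VERDICT (by name: the statement is the Claim_ definition above) =====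
theorem max_heap_operations_spec : Claim_equal_max_heap_operations := by
  intro ops _
  show maxHeapLoopA ops [] [] = maxHeapLoopB ops [] []
  exact loop_eq ops [] [] []
    (by intro j hj0 hjlen; simp at hjlen)
    (List.Perm.refl _) (List.Pairwise.nil)
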